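-- pv_equiv track=rewrite | github.com/nitro-panks/battlestats | server/warships/management/commands/incremental_ranked_data.py | _interleave_candidate_ids
-- ===== SOURCE A (Python) =====
-- def _interleave_candidate_ids(known_ranked_ids: list[int], discovery_ids: list[int]) -> list[int]:
--     if not known_ranked_ids:
--         return discovery_ids
--     if not discovery_ids:
--         return known_ranked_ids
--
--     seen: set[int] = set()
--     ordered: list[int] = []
--     known_index = 0
--     discovery_index = 0
--     known_per_discovery = max(
--         1, (len(known_ranked_ids) + len(discovery_ids) - 1) // len(discovery_ids))
--
--     while known_index < len(known_ranked_ids) or discovery_index < len(discovery_ids):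
--         for _ in range(known_per_discovery):
--             if known_index >= len(known_ranked_ids):
--                 break
--             player_id = known_ranked_ids[known_index]
--             known_index += 1
--             if player_id in seen:
--                 continue
--             seen.add(player_id)
--             ordered.append(player_id)
--
--         if discovery_index >= len(discovery_ids):
--             continue
--
--         player_id = discovery_ids[discovery_index]
--         discovery_index += 1
--         if player_id in seen:
--             continue
--         seen.add(player_id)
--         ordered.append(player_id)
--
--     return ordered
-- ===== SOURCE B (Python) =====
-- def _interleave_candidate_ids(known_ranked_ids: list[int], discovery_ids: list[int]) -> list[int]:
--     if not known_ranked_ids: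
--         return discovery_ids
--     if not discovery_ids:
--         return known_ranked_ids
--
--     k = max(1, (len(known_ranked_ids) + len(discovery_ids) - 1) // len(discovery_ids))
--     chunks = [known_ranked_ids[i:i + k] for i in range(0, len(known_ranked_ids), k)]
--
--     raw: list[int] = []
--     for i in range(max(len(chunks), len(discovery_ids))):
--         if i < len(chunks):
--             raw.extend(chunks[i])
--         if i < len(discovery_ids):
--             raw.append(discovery_ids[i])
--
--     seen: set[int] = set()
--     out: list[int] = []
--     for x in raw:
--         if x not in seen:
--             seen.add(x)
--             out.append(x)
--     return out
-- ===== Notes on version B (the rewrite author's own statement) =====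
-- stated objective: alternative
-- what changed: Replaces A's stateful two-index while-loop with inline dedup by a pipeline: chunk the known list into ceil-sized slices, interleave chunks with discovery ids into one raw list, then deduplicate in a single final pass.
import Mathlib
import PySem

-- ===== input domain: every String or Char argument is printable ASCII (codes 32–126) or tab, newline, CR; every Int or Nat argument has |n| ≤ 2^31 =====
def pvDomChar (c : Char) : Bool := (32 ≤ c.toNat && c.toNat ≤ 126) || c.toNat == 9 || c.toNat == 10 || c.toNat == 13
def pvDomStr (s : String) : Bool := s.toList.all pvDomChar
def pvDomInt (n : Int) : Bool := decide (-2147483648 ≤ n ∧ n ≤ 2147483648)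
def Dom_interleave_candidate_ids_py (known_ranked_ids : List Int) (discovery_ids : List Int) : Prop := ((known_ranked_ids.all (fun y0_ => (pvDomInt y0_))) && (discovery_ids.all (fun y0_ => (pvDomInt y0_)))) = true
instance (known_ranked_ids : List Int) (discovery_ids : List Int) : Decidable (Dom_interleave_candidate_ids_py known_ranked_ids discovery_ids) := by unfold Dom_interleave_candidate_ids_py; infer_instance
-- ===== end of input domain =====

-- B restructures A's interleaving while-loop as chunk/interleave/dedup pipeline (alternative decomposition, same cost).

-- ===== PORT A =====
-- inner `for _ in range(known_per_discovery)` body: dedup-append one known id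
def pvStepA (p : PySem.Set Int × List Int) (x : Int) : PySem.Set Int × List Int :=
  if PySem.Set.contains p.1 x then p else (PySem.Set.add p.1 x, p.2 ++ [x])

-- A's while-loop; remaining suffixes of the two lists stand for the two indices
def pvLoopA (kpd : Nat) (hk : 1 ≤ kpd) (ks ds : List Int)
    (seen : PySem.Set Int) (ordered : List Int) : List Int :=
  if ks = [] ∧ ds = [] then ordered
  else
    let p := (ks.take kpd).foldl pvStepA (seen, ordered)
    match _h2 : ds with
    | [] => pvLoopA kpd hk (ks.drop kpd) [] p.1 p.2
    | d :: ds' =>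
      if PySem.Set.contains p.1 d then pvLoopA kpd hk (ks.drop kpd) ds' p.1 p.2
      else pvLoopA kpd hk (ks.drop kpd) ds' (PySem.Set.add p.1 d) (p.2 ++ [d])
termination_by ks.length + ds.length
decreasing_by
  all_goals simp_all [List.length_drop]
  all_goals first
    | omega
    | exact ⟨List.length_pos_iff.mpr (by assumption), hk⟩

def interleave_candidate_ids_py (known_ranked_ids : List Int) (discovery_ids : List Int) : List Int :=
  if known_ranked_ids = [] then discovery_ids
  else if discovery_ids = [] then known_ranked_ids
  else
    pvLoopA (max 1 ((known_ranked_ids.length + discovery_ids.length - 1) / discovery_ids.length))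
      (le_max_left 1 _) known_ranked_ids discovery_ids (PySem.Set.ofList []) []

-- ===== PORT B =====
-- consecutive chunks of size k (k ≥ 1)
def pvChunks (k : Nat) (hk : 1 ≤ k) : List Int → List (List Int)
  | [] => []
  | x :: xs => ((x :: xs).take k) :: pvChunks k hk ((x :: xs).drop k)
termination_by ks => ks.length
decreasing_by simp [List.length_drop]; omega

-- interleave chunk i with discovery_ids[i]
def pvBuildRaw : List (List Int) → List Int → List Int
  | [], [] => []
  | [], d :: ds => d :: pvBuildRaw [] ds
  | c :: cs, [] => c ++ pvBuildRaw cs []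
  | c :: cs, d :: ds => c ++ d :: pvBuildRaw cs ds

-- one-pass dedup keeping first occurrences
def pvDedup (seen : PySem.Set Int) : List Int → List Int
  | [] => []
  | x :: xs => if PySem.Set.contains seen x then pvDedup seen xs
               else x :: pvDedup (PySem.Set.add seen x) xs

def interleave_candidate_ids_py_alt (known_ranked_ids : List Int) (discovery_ids : List Int) : List Int :=
  if known_ranked_ids = [] then discovery_ids
  else if discovery_ids = [] then known_ranked_ids
  else
    pvDedup (PySem.Set.ofList [])
      (pvBuildRaw
        (pvChunks (max 1 ((known_ranked_ids.length + discovery_ids.length - 1) / discovery_ids.length))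
          (le_max_left 1 _) known_ranked_ids)
        discovery_ids)

-- ===== PRECONDITION & SPEC =====
def Spec_interleave_candidate_ids_py (known_ranked_ids : List Int) (discovery_ids : List Int) (out : List Int) : Prop := out = interleave_candidate_ids_py_alt known_ranked_ids discovery_ids
instance (known_ranked_ids : List Int) (discovery_ids : List Int) (out : List Int) : Decidable (Spec_interleave_candidate_ids_py known_ranked_ids discovery_ids out) := by unfold Spec_interleave_candidate_ids_py; infer_instance

-- ===== CLAIM (what is proved, stated in full; the proofs are below) =====
def Claim_equal_interleave_candidate_ids_py : Prop := ∀ (known_ranked_ids : List Int) (discovery_ids : List Int), Dom_interleave_candidate_ids_py known_ranked_ids discovery_ids → Spec_interleave_candidate_ids_py known_ranked_ids discovery_ids (interleave_candidate_ids_py known_ranked_ids discovery_ids)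

-- ===== LEMMAS AND PROOFS =====

lemma pvFoldl_stepA (xs : List Int) : ∀ (seen : PySem.Set Int) (ord : List Int),
    xs.foldl pvStepA (seen, ord) = (xs.foldl PySem.Set.add seen, ord ++ pvDedup seen xs) := by
  induction xs with
  | nil => intro seen ord; simp [pvDedup]
  | cons x xs ih =>
    intro seen ord
    by_cases h : x ∈ seen
    · have hadd : PySem.Set.add seen x = seen := by simp [PySem.Set.add, h]
      simp [List.foldl_cons, pvStepA, h, pvDedup, ih]
    · simp [List.foldl_cons, pvStepA, h, pvDedup, ih]

lemma pvDedup_append (xs : List Int) : ∀ (seen : PySem.Set Int) (ys : List Int),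
    pvDedup seen (xs ++ ys) = pvDedup seen xs ++ pvDedup (xs.foldl PySem.Set.add seen) ys := by
  induction xs with
  | nil => intro seen ys; simp [pvDedup]
  | cons x xs ih =>
    intro seen ys
    by_cases h : x ∈ seen
    · have hadd : PySem.Set.add seen x = seen := by simp [PySem.Set.add, h]
      simp [pvDedup, h, ih]
    · simp [pvDedup, h, ih]

lemma pvBuildRaw_chunks_nil (k : Nat) (hk : 1 ≤ k) (ks : List Int) (hks : ks ≠ []) :
    pvBuildRaw (pvChunks k hk ks) [] = ks.take k ++ pvBuildRaw (pvChunks k hk (ks.drop k)) [] := by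
  cases ks with
  | nil => exact absurd rfl hks
  | cons x xs => rw [pvChunks]; simp [pvBuildRaw]

lemma pvBuildRaw_chunks_cons (k : Nat) (hk : 1 ≤ k) (ks : List Int) (d : Int) (ds : List Int) :
    pvBuildRaw (pvChunks k hk ks) (d :: ds)
      = ks.take k ++ d :: pvBuildRaw (pvChunks k hk (ks.drop k)) ds := by
  cases ks with
  | nil => simp [pvChunks, pvBuildRaw]
  | cons x xs => rw [pvChunks]; simp [pvBuildRaw]

lemma pvLoopA_eq (kpd : Nat) (hk : 1 ≤ kpd) :
    ∀ (n : Nat) (ks ds : List Int) (seen : PySem.Set Int) (ord : List Int),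
    ks.length + ds.length ≤ n →
    pvLoopA kpd hk ks ds seen ord = ord ++ pvDedup seen (pvBuildRaw (pvChunks kpd hk ks) ds) := by
  intro n
  induction n with
  | zero =>
    intro ks ds seen ord hn
    have hks : ks = [] := by cases ks <;> simp_all
    have hds : ds = [] := by cases ds <;> simp_all
    subst hks; subst hds
    rw [pvLoopA]
    simp [pvChunks, pvBuildRaw, pvDedup]
  | succ n ih =>
    intro ks ds seen ord hn
    by_cases hemp : ks = [] ∧ ds = []
    · obtain ⟨h1, h2⟩ := hemp; subst h1; subst h2
      rw [pvLoopA]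
      simp [pvChunks, pvBuildRaw, pvDedup]
    · rw [pvLoopA]
      rw [if_neg hemp]
      cases ds with
      | nil =>
        have hks : ks ≠ [] := by rintro rfl; exact hemp ⟨rfl, rfl⟩
        have hlen : 0 < ks.length := List.length_pos_iff.mpr hks
        simp only [pvFoldl_stepA]
        rw [ih (ks.drop kpd) [] _ _ (by simp [List.length_drop]; omega)]
        rw [pvBuildRaw_chunks_nil kpd hk ks hks, pvDedup_append]
        simp [List.append_assoc]
      | cons d ds' =>
        simp only [pvFoldl_stepA]
        rw [pvBuildRaw_chunks_cons, pvDedup_append]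
        have hrec : (ks.drop kpd).length + ds'.length ≤ n := by
          simp only [List.length_drop]
          simp only [List.length_cons] at hn
          omega
        by_cases h : d ∈ (ks.take kpd |>.foldl PySem.Set.add seen)
        · have hadd : PySem.Set.add (ks.take kpd |>.foldl PySem.Set.add seen) d
              = (ks.take kpd |>.foldl PySem.Set.add seen) := by simp [PySem.Set.add, h]
          rw [if_pos (by simpa using h), ih _ _ _ _ hrec]
          simp [pvDedup, h, List.append_assoc]
        · rw [if_neg (by simpa using h), ih _ _ _ _ hrec]
          simp [pvDedup, h, List.append_assoc]

-- ===== VERDICT (by name: the statement is the Claim_ definition above) =====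
theorem interleave_candidate_ids_py_spec : Claim_equal_interleave_candidate_ids_py := by
  intro ks ds _
  unfold Spec_interleave_candidate_ids_py interleave_candidate_ids_py interleave_candidate_ids_py_alt
  by_cases h1 : ks = []
  · simp [h1]
  · by_cases h2 : ds = []
    · simp [h1, h2]
    · simp only [if_neg h1, if_neg h2]
      exact pvLoopA_eq _ _ (ks.length + ds.length) ks ds _ _ le_rfl
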